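-- pv_equiv track=rewrite | github.com/alaaboubrima/Table-des-Suffixes | code.py | build_HTR
-- ===== SOURCE A (Python) =====
-- def build_HTR(TS):
--     n = len(TS)
--     HTR = []
--     HTR.append((TS[0][1], TS[0][0], '', 0))
--
--     for i in range(1, n):
--         lcp = ""
--         htr = 0
--         suffix1 = TS[i][0]
--         suffix2 = TS[i - 1][0]
--         while htr < len(suffix1) and htr < len(suffix2) and suffix1[htr] == suffix2[htr]:
--             lcp += suffix1[htr]
--             htr += 1
--         if lcp == "":
--             lcp ="\u03B5"
--         HTR.append((TS[i][1], TS[i][0], lcp, htr))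
--
--     return HTR
-- ===== SOURCE B (Python) =====
-- def build_HTR(TS):
--     first = (TS[0][1], TS[0][0], '', 0)
--
--     def entry(prev, cur):
--         s, t = cur[0], prev[0]
--         h = next((k for k, (x, y) in enumerate(zip(s, t)) if x != y),
--                  min(len(s), len(t)))
--         return (cur[1], cur[0], s[:h] if h else '\u03B5', h)
--
--     return [first] + [entry(p, c) for p, c in zip(TS, TS[1:])]
-- ===== Notes on version B (the rewrite author's own statement) =====
-- stated objective: idiomatic
-- what changed: B replaces the index loop with char-by-char string accumulation by a comprehension over zip(TS, TS[1:]) that finds the first mismatch position via next/enumerate over the zipped characters and slices the common prefix in one step.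
import Mathlib
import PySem

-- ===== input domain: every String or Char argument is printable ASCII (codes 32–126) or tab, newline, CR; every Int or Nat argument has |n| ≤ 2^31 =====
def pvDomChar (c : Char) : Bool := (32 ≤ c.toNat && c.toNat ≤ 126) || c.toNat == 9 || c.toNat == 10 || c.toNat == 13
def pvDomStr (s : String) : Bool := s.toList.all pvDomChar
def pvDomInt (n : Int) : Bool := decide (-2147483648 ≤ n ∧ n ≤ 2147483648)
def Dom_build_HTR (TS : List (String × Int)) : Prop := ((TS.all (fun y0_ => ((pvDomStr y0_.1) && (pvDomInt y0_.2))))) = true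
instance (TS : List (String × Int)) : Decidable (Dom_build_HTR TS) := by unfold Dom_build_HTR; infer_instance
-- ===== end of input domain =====

-- B finds the first-mismatch index over zip(TS, TS[1:]) and slices the prefix, instead of A's
-- index loop with character-by-character accumulation; same cost, more idiomatic.

-- ===== PORT A =====
-- the while loop: while htr < len(s1) and htr < len(s2) and s1[htr] == s2[htr]: lcp += s1[htr]; htr += 1
def pvWhileLCP (s1 s2 : List Char) (lcp : List Char) (htr : Nat) : List Char × Nat :=
  if h : htr < s1.length ∧ htr < s2.length ∧ s1[htr]! = s2[htr]! then
    pvWhileLCP s1 s2 (lcp ++ [s1[htr]!]) (htr + 1)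
  else (lcp, htr)
termination_by s1.length - htr
decreasing_by omega

-- range(1, n) is ported by hand as List.range' 1 (n - 1), exact here since n = len(TS)
def build_HTR (TS : List (String × Int)) : List (Int × String × String × Int) :=
  match TS with
  | [] => []  -- TS[0] raises IndexError in Python; excluded by Pre_build_HTR
  | t0 :: _ =>
    (List.range' 1 (TS.length - 1)).foldl (fun HTR i =>
      HTR ++ [(
        let suffix1 := (TS[i]!).1
        let suffix2 := (TS[i-1]!).1
        let p := pvWhileLCP suffix1.toList suffix2.toList [] 0
        let lcp := if p.1 = [] then "ε" else String.mk p.1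
        ((TS[i]!).2, (TS[i]!).1, lcp, (p.2 : Int)))])
      [(t0.2, t0.1, "", 0)]

-- ===== PORT B =====
-- next((k for k,(x,y) in enumerate(zip(s,t)) if x != y), default)
def pvFirstMismatch : List (Char × Char) → Nat → Option Nat
  | [], _ => none
  | (x, y) :: rest, k => if x ≠ y then some k else pvFirstMismatch rest (k + 1)

def pvEntry (prev cur : String × Int) : Int × String × String × Int :=
  let s := cur.1.toList
  let t := prev.1.toList
  let h := (pvFirstMismatch (s.zip t) 0).getD (min s.length t.length)
  (cur.2, cur.1, if h = 0 then "ε" else String.mk (s.take h), (h : Int))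

def build_HTR_alt (TS : List (String × Int)) : List (Int × String × String × Int) :=
  match TS with
  | [] => []  -- TS[0] raises IndexError in Python; excluded by Pre_build_HTR
  | t0 :: rest =>
    (t0.2, t0.1, "", 0) :: (TS.zip rest).map (fun pc => pvEntry pc.1 pc.2)

-- ===== PRECONDITION & SPEC =====
-- A (and B) raise IndexError on the empty list (TS[0]); only that input is excluded.
def Pre_build_HTR (TS : List (String × Int)) : Prop := TS ≠ []
instance (TS : List (String × Int)) : Decidable (Pre_build_HTR TS) := by unfold Pre_build_HTR; infer_instance
def pvWitness_build_HTR : (List (String × Int)) := [("ab", 0), ("abc", 1), ("x", 2)]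

def Spec_build_HTR (TS : List (String × Int)) (out : List (Int × String × String × Int)) : Prop := out = build_HTR_alt TS
instance (TS : List (String × Int)) (out : List (Int × String × String × Int)) : Decidable (Spec_build_HTR TS out) := by unfold Spec_build_HTR; infer_instance

-- ===== CLAIM (what is proved, stated in full; the proofs are below) =====
def Claim_equal_build_HTR : Prop := ∀ (TS : List (String × Int)), Dom_build_HTR TS → Pre_build_HTR TS → Spec_build_HTR TS (build_HTR TS)

-- ===== LEMMAS AND PROOFS =====

-- the longest common prefix as a simple structural recursion, used to relate the two ports
def pvLcp : List Char → List Char → List Char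
  | x :: xs, y :: ys => if x = y then x :: pvLcp xs ys else []
  | _, _ => []

theorem pvLcp_drop_step (s1 s2 : List Char) (htr : Nat)
    (h1 : htr < s1.length) (h2 : htr < s2.length) (he : s1[htr]! = s2[htr]!) :
    pvLcp (s1.drop htr) (s2.drop htr)
      = s1[htr]! :: pvLcp (s1.drop (htr+1)) (s2.drop (htr+1)) := by
  have he' : s1[htr] = s2[htr] := by
    rwa [getElem!_pos s1 htr h1, getElem!_pos s2 htr h2] at he
  rw [List.drop_eq_getElem_cons h1, List.drop_eq_getElem_cons h2, getElem!_pos s1 htr h1]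
  simp [pvLcp, he']

theorem pvLcp_drop_stop (s1 s2 : List Char) (htr : Nat)
    (h : ¬ (htr < s1.length ∧ htr < s2.length ∧ s1[htr]! = s2[htr]!)) :
    pvLcp (s1.drop htr) (s2.drop htr) = [] := by
  by_cases h1 : htr < s1.length
  · by_cases h2 : htr < s2.length
    · rw [List.drop_eq_getElem_cons h1, List.drop_eq_getElem_cons h2]
      have hne : s1[htr]! ≠ s2[htr]! := fun he => h ⟨h1, h2, he⟩
      rw [getElem!_pos s1 htr h1, getElem!_pos s2 htr h2] at hne
      simp [pvLcp, hne]
    · rw [List.drop_eq_nil_of_le (show s2.length ≤ htr by omega)]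
      cases s1.drop htr <;> simp [pvLcp]
  · rw [List.drop_eq_nil_of_le (show s1.length ≤ htr by omega)]
    simp [pvLcp]

theorem pvWhileLCP_eq (s1 s2 : List Char) :
    ∀ (htr : Nat) (lcp : List Char),
      pvWhileLCP s1 s2 lcp htr
        = (lcp ++ pvLcp (s1.drop htr) (s2.drop htr),
           htr + (pvLcp (s1.drop htr) (s2.drop htr)).length) := by
  intro htr lcp
  fun_induction pvWhileLCP s1 s2 lcp htr with
  | case1 lcp htr h ih =>
    obtain ⟨h1, h2, he⟩ := h
    rw [ih, pvLcp_drop_step s1 s2 htr h1 h2 he]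
    simp
    omega
  | case2 lcp htr h =>
    rw [pvLcp_drop_stop s1 s2 htr h]
    simp

theorem pvFirstMismatch_shift (l : List (Char × Char)) :
    ∀ k, pvFirstMismatch l k = (pvFirstMismatch l 0).map (· + k) := by
  induction l with
  | nil => intro k; simp [pvFirstMismatch]
  | cons p rest ih =>
    intro k
    obtain ⟨x, y⟩ := p
    by_cases hxy : x = y
    · simp only [pvFirstMismatch, hxy, ne_eq, not_true_eq_false, if_false]
      rw [ih (k + 1), ih 1]
      cases pvFirstMismatch rest 0 <;> simp <;> omega
    · simp [pvFirstMismatch, hxy]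

theorem pvMismatch_eq_lcp_len (s t : List Char) :
    (pvFirstMismatch (s.zip t) 0).getD (min s.length t.length) = (pvLcp s t).length := by
  induction s generalizing t with
  | nil => simp [pvFirstMismatch, pvLcp]
  | cons x xs ih =>
    cases t with
    | nil => simp [pvFirstMismatch, pvLcp]
    | cons y ys =>
      by_cases hxy : x = y
      · simp only [List.zip_cons_cons, pvFirstMismatch, hxy, ne_eq, not_true_eq_false, if_false]
        rw [pvFirstMismatch_shift (xs.zip ys) 1]
        have := ih ys
        cases h : pvFirstMismatch (xs.zip ys) 0 with
        | none => rw [h] at this; simp at this ⊢; simp [pvLcp]; omega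
        | some j => rw [h] at this; simp at this ⊢; simp [pvLcp, hxy]; omega
      · simp [pvFirstMismatch, pvLcp, hxy]

theorem pvTake_lcp_len (s t : List Char) :
    s.take (pvLcp s t).length = pvLcp s t := by
  induction s generalizing t with
  | nil => simp [pvLcp]
  | cons x xs ih =>
    cases t with
    | nil => simp [pvLcp]
    | cons y ys =>
      by_cases hxy : x = y
      · simp [pvLcp, hxy, ih ys]
      · simp [pvLcp, hxy]

theorem pvEntry_eq (prev cur : String × Int) :
    pvEntry prev cur
      = (cur.2, cur.1,
         (if pvLcp cur.1.toList prev.1.toList = [] then "ε"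
          else String.mk (pvLcp cur.1.toList prev.1.toList)),
         ((pvLcp cur.1.toList prev.1.toList).length : Int)) := by
  simp only [pvEntry]
  rw [pvMismatch_eq_lcp_len, pvTake_lcp_len]
  simp [List.length_eq_zero_iff]

theorem pvPairs_eq (g : (String × Int) → (String × Int) → (Int × String × String × Int)) :
    ∀ (L : List (String × Int)) (TS : List (String × Int)) (i : Nat),
      1 ≤ i → i + L.length = TS.length →
      (List.range' i L.length).map (fun j => g (TS[j-1]!) (TS[j]!))
        = ((TS.drop (i-1)).zip (TS.drop i)).map (fun pc => g pc.1 pc.2) := by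
  intro L
  induction L with
  | nil =>
    intro TS i h1 hlen
    have : TS.drop i = [] := List.drop_eq_nil_of_le (by simp at hlen; omega)
    simp [this]
  | cons a L ih =>
    intro TS i h1 hlen
    simp only [List.length_cons] at hlen ⊢
    have hi : i < TS.length := by omega
    have hi1 : i - 1 < TS.length := by omega
    rw [List.range'_succ, List.map_cons]
    rw [List.drop_eq_getElem_cons hi1, show i - 1 + 1 = i by omega,
        List.drop_eq_getElem_cons hi, List.zip_cons_cons, List.map_cons]
    rw [getElem!_pos TS (i-1) hi1, getElem!_pos TS i hi]
    congr 1
    have := ih TS (i + 1) (by omega) (by omega)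
    rw [show i + 1 - 1 = i by omega] at this
    rw [← List.drop_eq_getElem_cons hi]
    exact this

-- ===== VERDICT (by name: the statement is the Claim_ definition above) =====
-- the per-index body of A's loop, as a function of the two adjacent tuples
theorem pvStepA_eq_pvEntry (prev cur : String × Int) :
    (let p := pvWhileLCP cur.1.toList prev.1.toList [] 0
     let lcp := if p.1 = [] then "ε" else String.mk p.1
     ((cur.2, cur.1, lcp, (p.2 : Int)) : Int × String × String × Int))
      = pvEntry prev cur := by
  rw [pvEntry_eq]
  simp only [pvWhileLCP_eq cur.1.toList prev.1.toList 0 [], List.drop_zero,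
    List.nil_append, Nat.zero_add]

theorem build_HTR_spec : Claim_equal_build_HTR := by
  intro TS hdom hpre
  unfold Spec_build_HTR
  cases TS with
  | nil => exact absurd rfl hpre
  | cons t0 rest =>
    simp only [build_HTR, build_HTR_alt]
    rw [PySem.List.foldl_append_singleton_eq_map]
    simp only [List.length_cons, Nat.add_sub_cancel, List.singleton_append]
    congr 1
    have hp := pvPairs_eq
      (fun prev cur =>
        let p := pvWhileLCP cur.1.toList prev.1.toList [] 0
        let lcp := if p.1 = [] then "ε" else String.mk p.1
        ((cur.2, cur.1, lcp, (p.2 : Int)) : Int × String × String × Int))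
      rest (t0 :: rest) 1 (by omega) (by simp [Nat.add_comm])
    simp only [Nat.sub_self, List.drop_zero, List.drop_one, List.tail_cons] at hp
    rw [hp]
    exact List.map_congr_left (fun pc _ => pvStepA_eq_pvEntry pc.1 pc.2)
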